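-- pv_equiv track=rewrite | github.com/p0l0satik/depth_cut | depth_test_single.py | count_labels
-- ===== SOURCE A (Python) =====
-- def count_labels(filtered, labels):
--     uniq = {}
--     depth_p = {}
--     for pos, a in enumerate(labels):
--         if not (a in uniq):
--             uniq[a] = 0
--             depth_p[a] = filtered[pos][2]
--         else:
--             uniq[a] +=1
--     return (uniq, depth_p)
-- ===== SOURCE B (Python) =====
-- def count_labels(filtered, labels):
--     # Per-key global queries instead of an incremental loop: dedup the labels
--     # (first-occurrence order), then ask the whole list for each key's count
--     # and first position.
--     seen = list(dict.fromkeys(labels))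
--     uniq = {k: labels.count(k) - 1 for k in seen}
--     depth_p = {k: filtered[labels.index(k)][2] for k in seen}
--     return (uniq, depth_p)
-- ===== Notes on version B (the rewrite author's own statement) =====
-- stated objective: alternative
-- what changed: Replaces A's single incremental dict-building loop with per-key global queries: dedup the labels once, then for each distinct key read its total count via list.count (minus one, reproducing A's off-by-one) and its first-occurrence depth via list.index.
import Mathlib
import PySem

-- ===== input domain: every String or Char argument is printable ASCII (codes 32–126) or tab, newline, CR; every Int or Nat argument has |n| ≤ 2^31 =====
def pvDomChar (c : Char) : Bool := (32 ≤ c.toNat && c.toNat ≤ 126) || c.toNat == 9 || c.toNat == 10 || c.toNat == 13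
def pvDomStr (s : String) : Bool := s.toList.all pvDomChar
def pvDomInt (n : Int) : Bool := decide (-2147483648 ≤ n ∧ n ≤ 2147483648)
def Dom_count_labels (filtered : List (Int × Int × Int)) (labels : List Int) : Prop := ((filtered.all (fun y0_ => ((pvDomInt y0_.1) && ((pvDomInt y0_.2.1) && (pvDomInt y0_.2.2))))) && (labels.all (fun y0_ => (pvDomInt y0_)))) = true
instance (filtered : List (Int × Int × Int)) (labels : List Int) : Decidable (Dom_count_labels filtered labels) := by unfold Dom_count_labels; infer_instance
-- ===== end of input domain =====

-- B replaces A's single incremental dict-building loop by per-key global queries (ordered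
-- dedup, then list.count / list.index for each distinct key); different decomposition, not faster.

-- ===== PORT A =====
-- filtered[pos][2] is read through pyGetD with a dummy default; Pre_ guarantees the index is
-- in range on every read A actually performs, so the default is never the result.
def count_labels (filtered : List (Int × Int × Int)) (labels : List Int) : (List (Int × Int)) × (List (Int × Int)) :=
  let st := (PySem.List.enumerate labels).foldl
    (fun (st : PySem.Dict Int Int × PySem.Dict Int Int) pa =>
      if st.1.contains pa.2 = false then
        (st.1.insert pa.2 0, st.2.insert pa.2 (PySem.List.pyGetD filtered pa.1 (0, 0, 0)).2.2)
      else
        (st.1.modify pa.2 0 (· + 1), st.2))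
    (PySem.Dict.empty, PySem.Dict.empty)
  (st.1.items, st.2.items)

-- ===== PORT B =====
-- labels.index(k) always succeeds (k is drawn from the labels); the .getD 0 fallback is never taken.
def count_labels_alt (filtered : List (Int × Int × Int)) (labels : List Int) : (List (Int × Int)) × (List (Int × Int)) :=
  let seen := PySem.List.dedup labels
  let uniq := seen.map (fun k => (k, (PySem.List.count labels k : Int) - 1))
  let depth_p := seen.map (fun k =>
    (k, (PySem.List.pyGetD filtered (((PySem.List.index? labels k).getD 0 : Nat) : Int) (0, 0, 0)).2.2))
  (uniq, depth_p)

-- ===== PRECONDITION & SPEC =====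
-- Pre_ excludes exactly the inputs on which the Python raises IndexError: those where some
-- label's FIRST occurrence sits at a position ≥ len(filtered) (only first occurrences index filtered).
def Pre_count_labels (filtered : List (Int × Int × Int)) (labels : List Int) : Prop :=
  ∀ (k : Nat) (h : k < labels.length), labels[k] ∉ labels.take k → k < filtered.length
instance (filtered : List (Int × Int × Int)) (labels : List Int) : Decidable (Pre_count_labels filtered labels) := by unfold Pre_count_labels; infer_instance
def pvWitness_count_labels : (List (Int × Int × Int)) × List Int := ([(1, 2, 3)], [1, 1])
def Spec_count_labels (filtered : List (Int × Int × Int)) (labels : List Int) (out : (List (Int × Int)) × (List (Int × Int))) : Prop := out = count_labels_alt filtered labels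
instance (filtered : List (Int × Int × Int)) (labels : List Int) (out : (List (Int × Int)) × (List (Int × Int))) : Decidable (Spec_count_labels filtered labels out) := by unfold Spec_count_labels; infer_instance

-- ===== CLAIM (what is proved, stated in full; the proofs are below) =====
def Claim_equal_count_labels : Prop := ∀ (filtered : List (Int × Int × Int)) (labels : List Int), Dom_count_labels filtered labels → Pre_count_labels filtered labels → Spec_count_labels filtered labels (count_labels filtered labels)

-- ===== LEMMAS AND PROOFS =====

-- A's fused fold, characterised: its two dicts hold exactly B's per-key global queries.
theorem contains_mk_map (l : List Int) (g : Int → Int) (a : Int) :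
    (PySem.Dict.mk (l.map (fun k => (k, g k)))).contains a = decide (a ∈ l) := by
  rw [Bool.eq_iff_iff]
  simp [PySem.Dict.contains, List.any_map, Function.comp_def]

theorem fused_fold_eq (filtered : List (Int × Int × Int)) (labels : List Int) :
    (PySem.List.enumerate labels).foldl
      (fun (st : PySem.Dict Int Int × PySem.Dict Int Int) pa =>
        if st.1.contains pa.2 = false then
          (st.1.insert pa.2 0, st.2.insert pa.2 (PySem.List.pyGetD filtered pa.1 (0, 0, 0)).2.2)
        else
          (st.1.modify pa.2 0 (· + 1), st.2))
      (PySem.Dict.empty, PySem.Dict.empty) =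
    (PySem.Dict.mk ((PySem.List.dedup labels).map (fun k => (k, (PySem.List.count labels k : Int) - 1))),
     PySem.Dict.mk ((PySem.List.dedup labels).map (fun k =>
       (k, (PySem.List.pyGetD filtered (((PySem.List.index? labels k).getD 0 : Nat) : Int) (0, 0, 0)).2.2)))) := by
  induction labels using List.reverseRecOn with
  | nil => rfl
  | append_singleton l a ih =>
      rw [PySem.List.enumerate_append, List.foldl_append, ih]
      simp only [PySem.List.enumerate_cons, PySem.List.enumerate_nil, List.foldl_cons, List.foldl_nil]
      rw [contains_mk_map]
      by_cases hm : a ∈ l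
      · rw [if_neg (by simp [hm])]
        have hded : PySem.List.dedup (l ++ [a]) = PySem.List.dedup l := by
          simp only [PySem.List.dedup_eq_ofList, PySem.Set.ofList_append_singleton]
          exact PySem.Set.add_of_mem ((PySem.Set.mem_ofList l a).mpr hm)
        rw [hded]
        refine Prod.ext ?_ ?_
        · show (PySem.Dict.mk _).modify a 0 (· + 1) = _
          unfold PySem.Dict.modify
          have hg : (PySem.Dict.mk ((PySem.List.dedup l).map (fun k => (k, (PySem.List.count l k : Int) - 1)))).getD a 0
              = (PySem.List.count l a : Int) - 1 := by
            apply PySem.Dict.getD_of_mem_items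
            · exact List.mem_map.mpr ⟨a, (PySem.List.mem_dedup l a).mpr hm, rfl⟩
            · show ((PySem.List.dedup l).map _).map Prod.fst |>.Nodup
              simp [Function.comp_def]
          rw [hg]
          apply PySem.Dict.ext
          rw [PySem.Dict.items_insert_of_contains _ _ (by rw [contains_mk_map]; simp [hm])]
          show (((PySem.List.dedup l).map _).map _) = _
          rw [List.map_map]
          apply List.map_congr_left
          intro k hk
          by_cases hka : k = a
          · subst hka
            simp only [Function.comp_def, BEq.rfl, if_pos]
            simp [PySem.List.count_eq, List.count_append]
          · simp [hka, PySem.List.count_eq, List.count_append, Ne.symm hka]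
        · show (PySem.Dict.mk _) = PySem.Dict.mk _
          congr 1
          apply List.map_congr_left
          intro k hk
          rw [PySem.List.index?_append_of_mem _ ((PySem.List.mem_dedup l k).mp hk)]
      · rw [if_pos (by simp [hm])]
        have hded : PySem.List.dedup (l ++ [a]) = PySem.List.dedup l ++ [a] := by
          simp only [PySem.List.dedup_eq_ofList, PySem.Set.ofList_append_singleton]
          exact PySem.Set.add_of_not_mem (fun h => hm ((PySem.Set.mem_ofList l a).mp h))
        rw [hded]
        have hka : ∀ k ∈ PySem.List.dedup l, k ≠ a :=
          fun k hk e => hm (e ▸ (PySem.List.mem_dedup l k).mp hk)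
        refine Prod.ext ?_ ?_
        · apply PySem.Dict.ext
          rw [PySem.Dict.items_insert_of_not_contains _ _ (by rw [contains_mk_map]; simp [hm])]
          show _ = ((PySem.List.dedup l ++ [a]).map _)
          rw [List.map_append]
          congr 1
          · apply List.map_congr_left
            intro k hk
            have hak : a ≠ k := fun e => hka k hk e.symm
            simp [PySem.List.count_eq, List.count_append, hak]
          · simp [PySem.List.count_eq, List.count_append, List.count_eq_zero.mpr hm]
        · apply PySem.Dict.ext
          rw [PySem.Dict.items_insert_of_not_contains _ _ (by rw [contains_mk_map]; simp [hm])]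
          show _ = ((PySem.List.dedup l ++ [a]).map _)
          rw [List.map_append]
          congr 1
          · apply List.map_congr_left
            intro k hk
            rw [PySem.List.index?_append_of_mem _ ((PySem.List.mem_dedup l k).mp hk)]
          · simp only [List.map_cons, List.map_nil]
            rw [PySem.List.index?_append_singleton_self l a hm]
            norm_num

-- ===== VERDICT (by name: the statement is the Claim_ definition above) =====
theorem count_labels_spec : Claim_equal_count_labels := by
  intro filtered labels _ _
  unfold Spec_count_labels count_labels count_labels_alt
  rw [fused_fold_eq]
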